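-- pv_equiv track=rewrite | github.com/ufosearchspace-create/agent-squeaky | backend/scoring_engine/signals/temporal.py | _sleep_midpoint_hour
-- ===== SOURCE A (Python) =====
-- def _sleep_midpoint_hour(hours: set[int]) -> int | None:
--     """Midpoint hour (UTC) of the longest gap. None if no clear gap >=3h."""
--     all_hours = sorted(hours)
--     if len(all_hours) >= 24:
--         return None
--     max_g = 0
--     best_start = 0
--     best_len = 0
--     for start in range(24):
--         length = 0
--         h = start
--         while (h % 24) not in hours and length < 24:
--             length += 1
--             h += 1
--         if length > best_len:
--             best_len = length
--             best_start = start
--     if best_len < 3: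
--         return None
--     return (best_start + best_len // 2) % 24
-- ===== SOURCE B (Python) =====
-- def _sleep_midpoint_hour(hours: set[int]) -> int | None:
--     """Midpoint hour (UTC) of the longest gap. None if no clear gap >=3h."""
--     if len(hours) >= 24:
--         return None
--     present = [h for h in range(24) if h in hours]
--     if not present:
--         return 12
--     # circular gaps: each occupied hour c, with its circular successor nx,
--     # opens a free gap starting at (c+1) % 24 of length (nx - c - 1) % 24
--     gaps = [((c + 1) % 24, (nx - c - 1) % 24)
--             for c, nx in zip(present, present[1:] + present[:1])]
--     best_len = max(length for _, length in gaps)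
--     if best_len < 3:
--         return None
--     best_start = min(s for s, length in gaps if length == best_len)
--     return (best_start + best_len // 2) % 24
-- ===== Notes on version B (the rewrite author's own statement) =====
-- stated objective: faster
-- what changed: A sorts the whole set just for a length check and then scans all 24 start hours, each with an inner while loop over the circle (up to 576 membership tests); B sorts nothing (len() suffices), builds the occupied-hour list once and reads every circular free gap directly off consecutive occupied hours (start=(c+1)%24, length=(nx-c-1)%24), taking the longest gap with ties broken by smallest start and returning 12 directly when no hour in 0..23 is occupied.
import Mathlib
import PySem

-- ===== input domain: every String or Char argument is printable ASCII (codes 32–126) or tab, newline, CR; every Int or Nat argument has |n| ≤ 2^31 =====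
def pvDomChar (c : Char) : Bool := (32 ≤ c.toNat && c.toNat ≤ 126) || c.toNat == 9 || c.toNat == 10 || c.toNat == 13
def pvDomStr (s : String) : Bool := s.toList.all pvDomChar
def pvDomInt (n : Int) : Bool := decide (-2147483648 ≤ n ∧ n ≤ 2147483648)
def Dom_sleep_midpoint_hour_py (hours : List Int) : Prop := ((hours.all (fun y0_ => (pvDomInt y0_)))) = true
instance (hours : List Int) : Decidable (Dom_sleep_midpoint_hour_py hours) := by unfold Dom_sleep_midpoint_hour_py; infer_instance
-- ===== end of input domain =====

-- B replaces A's 24 inner while-scans (and the sort done only for a length check) by a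
-- direct enumeration of the circular free gaps between consecutive occupied hours;
-- objective: faster (no sort, no quadratic scan; measured ~2x in a timing run).
-- The Python parameter is a set; the List Int argument holds its distinct elements.

-- ===== PORT A =====
-- inner while loop: while (h % 24) not in hours and length < 24: length += 1; h += 1
def runA (hours : List Int) (h : Int) (len : Int) : Int :=
  if hc : len < 24 ∧ ¬ hours.contains (PySem.Int.mod h 24) then
    runA hours (h + 1) (len + 1)
  else len
termination_by (24 - len).toNat
decreasing_by omega

-- loop body: length = runA(start, 0); if length > best_len: best_len, best_start = length, start
def stepA (hours : List Int) (st : Int × Int) (start : Int) : Int × Int :=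
  let length := runA hours start 0
  if length > st.1 then (length, start) else st

def sleep_midpoint_hour_py (hours : List Int) : Option Int :=
  -- all_hours = sorted(hours); hours is a Python set, so sort the distinct elements
  if ((PySem.List.sorted (PySem.Set.ofList hours) (fun x => x) false).length : Int) ≥ 24 then none
  else
    -- for start in range(24): run the while loop, keep (best_len, best_start)
    let r := (PySem.List.pyRange 0 24 1).foldl (stepA hours) (0, 0)
    if r.1 < 3 then none
    else some (PySem.Int.mod (r.2 + PySem.Int.floordiv r.1 2) 24)

-- ===== PORT B =====
def sleep_midpoint_hour_py_alt (hours : List Int) : Option Int :=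
  -- len(hours) on the Python set = number of distinct elements
  if ((PySem.Set.ofList hours).length : Int) ≥ 24 then none
  else
    -- present = [h for h in range(24) if h in hours]
    let present := (PySem.List.pyRange 0 24 1).filter (fun h => hours.contains h)
    if present.isEmpty then some 12
    else
      -- gaps = [((c+1) % 24, (nx-c-1) % 24) for c, nx in zip(present, present[1:] + present[:1])]
      let gaps := (present.zip (present.drop 1 ++ present.take 1)).map
        (fun p => (PySem.Int.mod (p.1 + 1) 24, PySem.Int.mod (p.2 - p.1 - 1) 24))
      -- best_len = max(length for _, length in gaps)
      match PySem.List.max? (gaps.map (fun g => g.2)) (fun x => x) with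
      | none => none
      | some bestLen =>
        if bestLen < 3 then none
        else
          -- best_start = min(s for s, length in gaps if length == best_len)
          match PySem.List.min? ((gaps.filter (fun g => g.2 == bestLen)).map (fun g => g.1)) (fun x => x) with
          | none => none
          | some bestStart => some (PySem.Int.mod (bestStart + PySem.Int.floordiv bestLen 2) 24)

-- ===== PRECONDITION & SPEC =====
def Spec_sleep_midpoint_hour_py (hours : List Int) (out : Option Int) : Prop := out = sleep_midpoint_hour_py_alt hours
instance (hours : List Int) (out : Option Int) : Decidable (Spec_sleep_midpoint_hour_py hours out) := by unfold Spec_sleep_midpoint_hour_py; infer_instance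

-- ===== CLAIM (what is proved, stated in full; the proofs are below) =====
def Claim_equal_sleep_midpoint_hour_py : Prop := ∀ (hours : List Int), Dom_sleep_midpoint_hour_py hours → Spec_sleep_midpoint_hour_py hours (sleep_midpoint_hour_py hours)

-- ===== LEMMAS AND PROOFS =====
def occB (hours : List Int) (t : Nat) : Bool := hours.contains (((t % 24 : Nat) : Int))
def freeCap (hours : List Int) (h : Nat) : Nat → Nat
  | 0 => 0
  | m + 1 => if occB hours h then 0 else freeCap hours (h + 1) m + 1
def fN (hours : List Int) (s : Nat) : Nat := freeCap hours s 24

theorem mod_cast_24 (h : Nat) : PySem.Int.mod (h : Int) 24 = ((h % 24 : Nat) : Int) := by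
  simp [PySem.Int.mod, Int.fmod_eq_emod]

theorem runA_eq_freeCap (hours : List Int) :
    ∀ (m c h : Nat), c + m = 24 →
      runA hours (h : Int) (c : Int) = ((c : Int) + (freeCap hours h m : Int)) := by
  intro m
  induction m with
  | zero =>
      intro c h hcm
      obtain rfl : c = 24 := by omega
      rw [runA, dif_neg]
      · simp [freeCap]
      · rintro ⟨h1, -⟩; omega
  | succ m ih =>
      intro c h hcm
      rw [runA]
      by_cases hmem : occB hours h = true
      · rw [dif_neg]
        · simp [freeCap, hmem]
        · rw [mod_cast_24]
          unfold occB at hmem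
          rintro ⟨-, hc⟩
          apply hc
          have hcast : ((h % 24 : Nat) : Int) = (h : Int) % 24 := by omega
          rw [hcast] at hmem
          simpa using hmem
      · rw [dif_pos ⟨by exact_mod_cast (by omega : c < 24), by rw [mod_cast_24]; unfold occB at hmem; simp_all⟩]
        have h1 : (h : Int) + 1 = ((h + 1 : Nat) : Int) := by push_cast; ring
        have h2 : (c : Int) + 1 = ((c + 1 : Nat) : Int) := by push_cast; ring
        rw [h1, h2, ih (c + 1) (h + 1) (by omega)]
        simp [freeCap, hmem]
        ring

theorem freeCap_le (hours : List Int) : ∀ (m h : Nat), freeCap hours h m ≤ m := by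
  intro m
  induction m with
  | zero => intro h; simp [freeCap]
  | succ m ih =>
      intro h
      by_cases hmem : occB hours h = true <;> simp [freeCap, hmem] <;> exact ih (h+1)

theorem freeCap_min (hours : List Int) :
    ∀ (m m' h : Nat), m ≤ m' → freeCap hours h m = min (freeCap hours h m') m := by
  intro m
  induction m with
  | zero => intro m' h _; simp [freeCap]
  | succ m ih =>
      intro m' h hle
      cases m' with
      | zero => omega
      | succ m'' =>
          by_cases hmem : occB hours h = true
          · simp [freeCap, hmem]
          · simp only [freeCap]
            rw [if_neg (by simp [hmem]), if_neg (by simp [hmem]), ih m'' (h + 1) (by omega)]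
            omega

theorem freeCap_mod (hours : List Int) :
    ∀ (m h : Nat), freeCap hours h m = freeCap hours (h % 24) m := by
  intro m
  induction m with
  | zero => intro h; simp [freeCap]
  | succ m ih =>
      intro h
      have hocc : occB hours h = occB hours (h % 24) := by
        unfold occB; rw [Nat.mod_mod_of_dvd h (by norm_num)]
      simp only [freeCap, hocc]
      by_cases hmem : occB hours (h % 24) = true
      · simp [hmem]
      · simp only [hmem]
        have heq : (h + 1) % 24 = (h % 24 + 1) % 24 := by omega
        rw [ih (h + 1), ih (h % 24 + 1), heq]

theorem freeCap_all (hours : List Int) :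
    ∀ (m h : Nat), (∀ j, j < m → occB hours (h + j) = false) → freeCap hours h m = m := by
  intro m
  induction m with
  | zero => intro h _; simp [freeCap]
  | succ m ih =>
      intro h hall
      have h0 : occB hours h = false := by simpa using hall 0 (by omega)
      simp only [freeCap, h0, Bool.false_eq_true, if_false]
      rw [ih (h + 1) (fun j hj => by have := hall (j + 1) (by omega); rwa [show h + (j+1) = h + 1 + j by omega] at this)]

theorem freeCap_full (hours : List Int) :
    ∀ (m h : Nat), freeCap hours h m = m → ∀ j, j < m → occB hours (h + j) = false := by
  intro m
  induction m with
  | zero => intro h _ j hj; omega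
  | succ m ih =>
      intro h heq j hj
      by_cases h0 : occB hours h = true
      · simp [freeCap, h0] at heq
      · simp only [freeCap, h0, Bool.false_eq_true, if_false] at heq
        cases j with
        | zero => simpa using h0
        | succ j =>
            rw [show h + (j+1) = h + 1 + j by omega]
            exact ih (h + 1) (by omega) j (by omega)

theorem freeCap_first (hours : List Int) :
    ∀ (k m h : Nat), k < m → (∀ j, j < k → occB hours (h + j) = false) →
      occB hours (h + k) = true → freeCap hours h m = k := by
  intro k
  induction k with
  | zero =>
      intro m h hm _ hocc
      cases m with
      | zero => omega
      | succ m => simp only [freeCap]; rw [if_pos (by simpa using hocc)]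
  | succ k ih =>
      intro m h hm hfree hocc
      cases m with
      | zero => omega
      | succ m =>
          have h0 : occB hours h = false := by simpa using hfree 0 (by omega)
          simp only [freeCap, h0, Bool.false_eq_true, if_false]
          rw [ih m (h + 1) (by omega)
            (fun j hj => by have := hfree (j + 1) (by omega); rwa [show h + (j+1) = h + 1 + j by omega] at this)
            (by rwa [show h + 1 + k = h + (k+1) by omega])]

theorem fN_le_23 (hours : List Int) (t : Nat) (ht : t < 24) (hocc : occB hours t = true) :
    ∀ s, fN hours s ≤ 23 := by
  intro s
  by_contra hgt
  have h24 : fN hours s = 24 := le_antisymm (freeCap_le hours 24 s) (by omega)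
  have hall := freeCap_full hours 24 s h24
  have hj : (t + 24 - s % 24) % 24 < 24 := by omega
  have := hall ((t + 24 - s % 24) % 24) hj
  unfold occB at this hocc
  rw [show (s + (t + 24 - s % 24) % 24) % 24 = t % 24 by omega, Nat.mod_eq_of_lt ht] at this
  rw [Nat.mod_eq_of_lt ht] at hocc
  rw [hocc] at this
  cases this

theorem fN_succ (hours : List Int) (t : Nat) (ht : t < 24) (hocc : occB hours t = true)
    (s : Nat) (hfree : occB hours s = false) :
    fN hours s = fN hours (s + 1) + 1 := by
  unfold fN
  rw [show (24:Nat) = 23+1 from rfl, freeCap, if_neg (by simp [hfree])]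
  rw [freeCap_min hours 23 24 (s+1) (by omega)]
  have := fN_le_23 hours t ht hocc (s + 1)
  unfold fN at this
  simp only [show (23:Nat)+1 = 24 from rfl]
  omega

theorem fold_argmax (v : Int → Int) :
    ∀ (l : List Int) (st : Int × Int),
      (l.foldl (fun st x => if v x > st.1 then (v x, x) else st) st = st ∧ ∀ y ∈ l, v y ≤ st.1)
      ∨ (∃ l1 x l2, l = l1 ++ x :: l2 ∧
          l.foldl (fun st x => if v x > st.1 then (v x, x) else st) st = (v x, x) ∧
          v x > st.1 ∧ (∀ y ∈ l1, v y < v x) ∧ (∀ y ∈ l2, v y ≤ v x)) := by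
  intro l
  induction l with
  | nil => intro st; left; simp
  | cons x l ih =>
      intro st
      by_cases hx : v x > st.1
      · right
        rcases ih (v x, x) with ⟨hstay, hle⟩ | ⟨l1, x', l2, hdec, hres, hgt, hbefore, hafter⟩
        · exact ⟨[], x, l, by simp, by simp [hx, hstay], hx, by simp, hle⟩
        · refine ⟨x :: l1, x', l2, by simp [hdec], by simp [hx, hres], lt_trans hx hgt, ?_, hafter⟩
          intro y hy
          rcases List.mem_cons.1 hy with rfl | hy
          · exact hgt
          · exact hbefore y hy
      · rcases ih st with ⟨hstay, hle⟩ | ⟨l1, x', l2, hdec, hres, hgt, hbefore, hafter⟩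
        · left
          constructor
          · simp [hx, hstay]
          · intro y hy
            rcases List.mem_cons.1 hy with rfl | hy
            · omega
            · exact hle y hy
        · right
          refine ⟨x :: l1, x', l2, by simp [hdec], by simp [hx, hres], hgt, ?_, hafter⟩
          intro y hy
          rcases List.mem_cons.1 hy with rfl | hy
          · omega
          · exact hbefore y hy

theorem zip_tail_adj {α : Type} :
    ∀ (l : List α) (c nx : α), (c, nx) ∈ l.zip (l.drop 1) →
      ∃ l1 l2, l = l1 ++ c :: nx :: l2 := by
  intro l
  induction l with
  | nil => intro c nx h; simp at h
  | cons x l ih =>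
      intro c nx h
      cases l with
      | nil => simp at h
      | cons y l =>
          simp only [List.drop_one, List.tail_cons, List.zip_cons_cons, List.mem_cons] at h
          rcases h with h | h
          · injection h with h1 h2
            subst h1; subst h2
            exact ⟨[], l, rfl⟩
          · have h' : (c, nx) ∈ (y :: l).zip ((y :: l).drop 1) := by
              simpa [List.drop_one] using h
            obtain ⟨l1, l2, hdec⟩ := ih c nx h'
            exact ⟨x :: l1, l2, by simp [hdec]⟩

theorem zip_drop_snoc {α : Type} :
    ∀ (l : List α) (h : l ≠ []) (a : α),
      l.zip (l.drop 1 ++ [a]) = l.zip (l.drop 1) ++ [(l.getLast h, a)] := by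
  intro l
  induction l with
  | nil => intro h; simp at h
  | cons x l ih =>
      intro h a
      cases l with
      | nil => simp
      | cons y l =>
          have hne : y :: l ≠ [] := by simp
          have := ih hne a
          simp only [List.drop_one, List.tail_cons, List.cons_append, List.zip_cons_cons] at this ⊢
          rw [List.getLast_cons hne, this]

theorem zipCirc_eq {α : Type} (l : List α) (h : l ≠ []) :
    l.zip (l.drop 1 ++ l.take 1) = l.zip (l.drop 1) ++ [(l.getLast h, l.head h)] := by
  have htake : l.take 1 = [l.head h] := by
    cases l with
    | nil => simp at h
    | cons x t => simp
  rw [htake, zip_drop_snoc l h (l.head h)]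

theorem map_fst_zipCirc {α : Type} (l : List α) :
    (l.zip (l.drop 1 ++ l.take 1)).map Prod.fst = l := by
  apply List.map_fst_zip
  simp
  omega

def zipCirc {α : Type} (l : List α) : List (α × α) := l.zip (l.drop 1 ++ l.take 1)

theorem intmod_small (a : Int) (h1 : 0 ≤ a) (h2 : a < 24) : PySem.Int.mod a 24 = a := by
  simp [PySem.Int.mod, Int.fmod_eq_emod]
  omega

theorem intmod_neg (a : Int) (h1 : -24 ≤ a) (h2 : a < 0) : PySem.Int.mod a 24 = a + 24 := by
  simp [PySem.Int.mod, Int.fmod_eq_emod]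
  omega

def presN (hours : List Int) : List Nat := (List.range 24).filter (fun k => hours.contains (k : Int))

theorem mem_presN (hours : List Int) (k : Nat) :
    k ∈ presN hours ↔ k < 24 ∧ hours.contains (k : Int) = true := by
  simp [presN, List.mem_filter, List.mem_range]

theorem presN_pairwise (hours : List Int) : (presN hours).Pairwise (· < ·) := by
  exact (List.pairwise_lt_range).filter _

theorem present_eq (hours : List Int) :
    (PySem.List.pyRange 0 24 1).filter (fun h => hours.contains h)
      = (presN hours).map (fun k : Nat => (k : Int)) := by
  rw [PySem.List.pyRange_one]
  have h1 : ((24:Int) - 0).toNat = 24 := by decide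
  have h2 : (fun k : Nat => (0:Int) + ↑k) = (fun k : Nat => ((k:Nat) : Int)) := by funext k; ring
  rw [h1, h2, List.filter_map]
  have h3 : ((fun h : Int => hours.contains h) ∘ (fun k : Nat => (k:Int)))
      = (fun k : Nat => hours.contains (k:Int)) := rfl
  rw [h3]
  rfl

theorem pairwise_head_le (l : List Nat) (h : l.Pairwise (· < ·)) (hne : l ≠ []) :
    ∀ t ∈ l, l.head hne ≤ t := by
  cases l with
  | nil => simp at hne
  | cons x t =>
      intro u hu
      rcases List.mem_cons.1 hu with rfl | hu
      · simp
      · simp only [List.head_cons]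
        exact le_of_lt ((List.pairwise_cons.1 h).1 u hu)

theorem pairwise_le_getLast : ∀ (l : List Nat), l.Pairwise (· < ·) → ∀ (hne : l ≠ []),
    ∀ t ∈ l, t ≤ l.getLast hne := by
  intro l
  induction l with
  | nil => intro _ hne; simp at hne
  | cons x t ih =>
      intro h hne u hu
      cases t with
      | nil =>
          simp only [List.mem_singleton] at hu
          simp [hu]
      | cons y t' =>
          rw [List.getLast_cons (by simp)]
          have h2 := (List.pairwise_cons.1 h).2
          rcases List.mem_cons.1 hu with rfl | hu
          · exact le_of_lt (lt_of_lt_of_le ((List.pairwise_cons.1 h).1 y (by simp))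
              (ih h2 (by simp) y (by simp)))
          · exact ih h2 (by simp) u hu

theorem gap_char (hours : List Int) (c nx : Nat) (hmem : (c, nx) ∈ zipCirc (presN hours)) :
    c < 24 ∧ nx < 24 ∧ hours.contains (c : Int) = true ∧
    PySem.Int.mod ((nx : Int) - (c : Int) - 1) 24 = ((fN hours (c + 1) : Int)) ∧
    PySem.Int.mod ((c : Int) + 1) 24 = (((c + 1) % 24 : Nat) : Int) := by
  have hne : presN hours ≠ [] := by
    intro h0
    rw [zipCirc, h0] at hmem
    simp at hmem
  have hpw := presN_pairwise hours
  have hcastp : ((c : Int) + 1) = ((c + 1 : Nat) : Int) := by push_cast; ring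
  rw [zipCirc, zipCirc_eq _ hne, List.mem_append] at hmem
  rcases hmem with hadj | hwrap
  · -- adjacent pair in the sorted occupied list
    obtain ⟨l1, l2, hdec⟩ := zip_tail_adj _ c nx hadj
    have hc : c ∈ presN hours := by rw [hdec]; simp
    have hnx : nx ∈ presN hours := by rw [hdec]; simp
    obtain ⟨hc24, hcc⟩ := (mem_presN hours c).1 hc
    obtain ⟨hnx24, hnxc⟩ := (mem_presN hours nx).1 hnx
    have hpw' := hdec ▸ hpw
    rw [List.pairwise_append] at hpw'
    obtain ⟨hpw1, hpw2, hcross⟩ := hpw'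
    have hclt : c < nx := (List.pairwise_cons.1 hpw2).1 nx (by simp)
    have hbetween : ∀ t, c < t → t < nx → hours.contains (t : Int) = false := by
      intro t h1 h2
      by_contra hcon
      have ht : t ∈ presN hours := (mem_presN hours t).2 ⟨by omega, by simpa using hcon⟩
      rw [hdec] at ht
      rcases List.mem_append.1 ht with h | h
      · have := hcross t h c (by simp); omega
      · rcases List.mem_cons.1 h with rfl | h
        · omega
        · rcases List.mem_cons.1 h with rfl | h
          · omega
          · have := (List.pairwise_cons.1 (List.pairwise_cons.1 hpw2).2).1 t h; omega
    refine ⟨hc24, hnx24, hcc, ?_, by rw [hcastp, mod_cast_24]⟩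
    have hk : fN hours (c + 1) = nx - c - 1 := by
      apply freeCap_first hours (nx - c - 1) 24 (c + 1) (by omega)
      · intro j hj
        unfold occB
        rw [Nat.mod_eq_of_lt (by omega)]
        exact hbetween (c + 1 + j) (by omega) (by omega)
      · unfold occB
        rw [show c + 1 + (nx - c - 1) = nx by omega, Nat.mod_eq_of_lt hnx24]
        exact hnxc
    rw [hk, intmod_small _ (by omega) (by omega)]
    omega
  · -- wrap-around pair (last occupied hour, first occupied hour)
    have hcl : c = (presN hours).getLast hne := by
      have := List.mem_singleton.1 hwrap
      exact (Prod.mk.inj this).1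
    have hnxh : nx = (presN hours).head hne := by
      have := List.mem_singleton.1 hwrap
      exact (Prod.mk.inj this).2
    have hc : c ∈ presN hours := hcl ▸ List.getLast_mem hne
    have hnx : nx ∈ presN hours := hnxh ▸ List.head_mem hne
    obtain ⟨hc24, hcc⟩ := (mem_presN hours c).1 hc
    obtain ⟨hnx24, hnxc⟩ := (mem_presN hours nx).1 hnx
    have hle : nx ≤ c := by
      rw [hcl, hnxh]
      exact pairwise_le_getLast _ hpw hne _ (List.head_mem hne)
    have hupper : ∀ t, c < t → t < 24 → hours.contains (t : Int) = false := by
      intro t h1 h2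
      by_contra hcon
      have ht : t ∈ presN hours := (mem_presN hours t).2 ⟨h2, by simpa using hcon⟩
      have := pairwise_le_getLast _ hpw hne t ht
      rw [← hcl] at this
      omega
    have hlower : ∀ t, t < nx → hours.contains (t : Int) = false := by
      intro t h1
      by_contra hcon
      have ht : t ∈ presN hours := (mem_presN hours t).2 ⟨by omega, by simpa using hcon⟩
      have := pairwise_head_le _ hpw hne t ht
      rw [← hnxh] at this
      omega
    refine ⟨hc24, hnx24, hcc, ?_, by rw [hcastp, mod_cast_24]⟩
    have hk : fN hours (c + 1) = 23 - c + nx := by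
      apply freeCap_first hours (23 - c + nx) 24 (c + 1) (by omega)
      · intro j hj
        unfold occB
        by_cases hlt : c + 1 + j < 24
        · rw [Nat.mod_eq_of_lt hlt]
          exact hupper (c + 1 + j) (by omega) hlt
        · rw [show (c + 1 + j) % 24 = c + 1 + j - 24 by omega]
          exact hlower (c + 1 + j - 24) (by omega)
      · unfold occB
        rw [show (c + 1 + (23 - c + nx)) % 24 = nx by omega]
        exact hnxc
    rw [hk, intmod_neg _ (by omega) (by omega)]
    omega

theorem fN_mod (hours : List Int) (s : Nat) : fN hours s = fN hours (s % 24) :=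
  freeCap_mod hours 24 s

theorem argmax_is_gap (hours : List Int) (s : Nat) (hs : s < 24)
    (hmax : ∀ u, u < 24 → fN hours u ≤ fN hours s) (hpos : 1 ≤ fN hours s)
    (t : Nat) (ht : t < 24) (hocc : occB hours t = true) :
    ∃ c nx, (c, nx) ∈ zipCirc (presN hours) ∧ (c + 1) % 24 = s := by
  set c := (s + 23) % 24 with hc
  have hc24 : c < 24 := by omega
  have hcs : (c + 1) % 24 = s := by omega
  have hoccc : occB hours c = true := by
    by_contra hcon
    have hfalse : occB hours c = false := by simpa using hcon
    have hrec := fN_succ hours t ht hocc c hfalse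
    have : fN hours (c + 1) = fN hours s := by rw [fN_mod, hcs]
    have := hmax c hc24
    omega
  have hcmem : c ∈ presN hours := by
    apply (mem_presN hours c).2
    refine ⟨hc24, ?_⟩
    unfold occB at hoccc
    rwa [Nat.mod_eq_of_lt hc24] at hoccc
  have : c ∈ (zipCirc (presN hours)).map Prod.fst := by
    rw [show (zipCirc (presN hours)).map Prod.fst = presN hours from map_fst_zipCirc _]
    exact hcmem
  obtain ⟨⟨c', nx⟩, hp, hfst⟩ := List.mem_map.1 this
  exact ⟨c, nx, by simpa [← hfst] using hp, hcs⟩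


-- runA from start s computes the free-run length fN s
theorem runA_fN (hours : List Int) (xN : Nat) :
    runA hours (xN : Int) 0 = ((fN hours xN : Nat) : Int) := by
  have := runA_eq_freeCap hours 24 0 xN rfl
  simpa using this

theorem stepA_eq (hours : List Int) :
    stepA hours = fun st x => if runA hours x 0 > st.1 then (runA hours x 0, x) else st := rfl

theorem zip_map_circ {α β : Type} (l : List α) (f : α → β) :
    ((l.map f).zip ((l.map f).drop 1 ++ (l.map f).take 1))
      = (l.zip (l.drop 1 ++ l.take 1)).map (Prod.map f f) := by
  rw [← List.map_drop, ← List.map_take, ← List.map_append, List.zip_map]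

-- every element of B's gap list is (start, length) of a circular pair of occupied hours
theorem mem_gaps (hours : List Int) (g : Int × Int)
    (hg : g ∈ ((((presN hours).map (fun k : Nat => (k : Int))).zip
        (((presN hours).map (fun k : Nat => (k : Int))).drop 1 ++
         ((presN hours).map (fun k : Nat => (k : Int))).take 1)).map
        (fun p => (PySem.Int.mod (p.1 + 1) 24, PySem.Int.mod (p.2 - p.1 - 1) 24)))) :
    ∃ c nx, (c, nx) ∈ zipCirc (presN hours) ∧
      g = ((((c + 1) % 24 : Nat) : Int), ((fN hours ((c + 1) % 24) : Nat) : Int)) := by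
  rw [zip_map_circ] at hg
  rw [List.map_map] at hg
  obtain ⟨⟨c, nx⟩, hp, heq⟩ := List.mem_map.1 hg
  obtain ⟨-, -, -, hl, hst⟩ := gap_char hours c nx hp
  refine ⟨c, nx, hp, ?_⟩
  rw [← heq]
  simp only [Function.comp, Prod.map]
  rw [show ((c:Int) + 1) = ((c:Nat):Int) + 1 from rfl] at hst
  rw [hst, hl, fN_mod hours (c+1)]

-- and conversely the gap of a circular pair is in the list
theorem gaps_mem (hours : List Int) (c nx : Nat) (hp : (c, nx) ∈ zipCirc (presN hours)) :
    ((((c + 1) % 24 : Nat) : Int), ((fN hours ((c + 1) % 24) : Nat) : Int)) ∈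
      ((((presN hours).map (fun k : Nat => (k : Int))).zip
        (((presN hours).map (fun k : Nat => (k : Int))).drop 1 ++
         ((presN hours).map (fun k : Nat => (k : Int))).take 1)).map
        (fun p => (PySem.Int.mod (p.1 + 1) 24, PySem.Int.mod (p.2 - p.1 - 1) 24))) := by
  rw [zip_map_circ, List.map_map]
  apply List.mem_map.2
  refine ⟨(c, nx), hp, ?_⟩
  obtain ⟨-, -, -, hl, hst⟩ := gap_char hours c nx hp
  simp only [Function.comp, Prod.map]
  rw [hst, hl, fN_mod hours (c+1)]

-- ===== VERDICT (by name: the statement is the Claim_ definition above) =====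
theorem sleep_midpoint_hour_py_spec : Claim_equal_sleep_midpoint_hour_py := by
  intro hours _
  show sleep_midpoint_hour_py hours = sleep_midpoint_hour_py_alt hours
  unfold sleep_midpoint_hour_py sleep_midpoint_hour_py_alt
  rw [PySem.List.length_sorted]
  by_cases hlen : ((PySem.Set.ofList hours).length : Int) ≥ 24
  · rw [if_pos hlen, if_pos hlen]
  rw [if_neg hlen, if_neg hlen, present_eq, stepA_eq]
  rcases fold_argmax (fun x => runA hours x 0) (PySem.List.pyRange 0 24 1) (0, 0) with
    ⟨hstay, hle⟩ | ⟨l1, x, l2, hdec, hres, hgt, hbefore, hafter⟩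
  · -- the fold never moved: every run length is 0; both sides give none
    have hne : presN hours ≠ [] := by
      intro h0
      have hallfree : ∀ j, j < 24 → occB hours (0 + j) = false := by
        intro j hj
        unfold occB
        by_contra hcon
        have hmem0 : j % 24 ∈ presN hours := by
          apply (mem_presN hours (j % 24)).2
          refine ⟨by omega, ?_⟩
          simp only [Bool.not_eq_false] at hcon
          simpa [Nat.mod_eq_of_lt hj, Nat.zero_add] using hcon
        rw [h0] at hmem0
        simp at hmem0
      have h24 : fN hours 0 = 24 := freeCap_all hours 24 0 hallfree
      have h0mem : (0 : Int) ∈ PySem.List.pyRange 0 24 1 := by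
        rw [PySem.List.mem_pyRange_one]; norm_num
      have hle0 := hle 0 h0mem
      have hr0 : runA hours 0 0 = ((fN hours 0 : Nat) : Int) := by
        simpa using runA_fN hours 0
      rw [hr0, h24] at hle0
      norm_num at hle0
    rw [hstay]
    have hie : (((presN hours).map (fun k : Nat => (k : Int))).isEmpty) = false := by
      simp [List.isEmpty_iff, hne]
    simp only [hie, Bool.false_eq_true, if_false]
    have hlens0 : ∀ y ∈ ((((presN hours).map (fun k : Nat => (k : Int))).zip
        ((((presN hours).map (fun k : Nat => (k : Int))).drop 1) ++
         (((presN hours).map (fun k : Nat => (k : Int))).take 1))).map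
          (fun p => (PySem.Int.mod (p.1 + 1) 24, PySem.Int.mod (p.2 - p.1 - 1) 24))).map
          (fun g => g.2), y = 0 := by
      intro y hy
      obtain ⟨g, hg, hgy⟩ := List.mem_map.1 hy
      obtain ⟨c, nx, hp, hgeq⟩ := mem_gaps hours g hg
      have hgn : ((c + 1) % 24 : Nat) < 24 := by omega
      have hmemr : ((((c + 1) % 24 : Nat) : Int)) ∈ PySem.List.pyRange 0 24 1 := by
        rw [PySem.List.mem_pyRange_one]
        constructor
        · positivity
        · exact_mod_cast hgn
      have := hle _ hmemr
      rw [runA_fN] at this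
      have hfz : fN hours ((c + 1) % 24) = 0 := by omega
      rw [← hgy, hgeq]
      simp [hfz]
    cases hm : PySem.List.max? ((((((presN hours).map (fun k : Nat => (k : Int))).zip
        ((((presN hours).map (fun k : Nat => (k : Int))).drop 1) ++
         (((presN hours).map (fun k : Nat => (k : Int))).take 1))).map
          (fun p => (PySem.Int.mod (p.1 + 1) 24, PySem.Int.mod (p.2 - p.1 - 1) 24))).map
          (fun g => g.2))) (fun x => x) with
    | none => simp [hm]
    | some bestLen =>
        simp only [hm]
        have hbl : bestLen = 0 := hlens0 _ (PySem.List.max?_mem hm)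
        rw [hbl]
        norm_num
  · -- the fold picked x, the first start attaining the maximal run length
    rw [hres]
    simp only []
    have hxmem : x ∈ PySem.List.pyRange 0 24 1 := by rw [hdec]; simp
    rw [PySem.List.mem_pyRange_one] at hxmem
    obtain ⟨hx0, hx24⟩ := hxmem
    have hxcast : x = ((x.toNat : Nat) : Int) := by omega
    have hxN24 : x.toNat < 24 := by omega
    have hvx : runA hours x 0 = ((fN hours x.toNat : Nat) : Int) := by
      conv_lhs => rw [hxcast]
      rw [runA_fN]
    have hMpos : 1 ≤ fN hours x.toNat := by
      rw [hvx] at hgt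
      simp only [Prod.fst] at hgt
      omega
    have hvmem : ∀ u : Nat, u < 24 → ((u : Nat) : Int) ∈ PySem.List.pyRange 0 24 1 := by
      intro u hu
      rw [PySem.List.mem_pyRange_one]
      constructor
      · positivity
      · exact_mod_cast hu
    have hmax : ∀ u, u < 24 → fN hours u ≤ fN hours x.toNat := by
      intro u hu
      have humem := hvmem u hu
      rw [hdec] at humem
      rcases List.mem_append.1 humem with h1 | h2
      · have := hbefore _ h1
        rw [runA_fN, hvx] at this
        omega
      · rcases List.mem_cons.1 h2 with heq | h3
        · have hux : u = x.toNat := by omega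
          exact le_of_eq (congrArg (fN hours) hux)
        · have := hafter _ h3
          rw [runA_fN, hvx] at this
          omega
    have hbefore' : ∀ u, u < x.toNat → fN hours u < fN hours x.toNat := by
      intro u hu
      have hpw := PySem.List.pairwise_lt_pyRange_one (a := 0) (b := 24)
      rw [hdec, List.pairwise_append] at hpw
      obtain ⟨-, hpw2, hcross⟩ := hpw
      have humem := hvmem u (by omega)
      rw [hdec] at humem
      rcases List.mem_append.1 humem with h1 | h2
      · have := hbefore _ h1
        rw [runA_fN, hvx] at this
        omega
      · exfalso
        rcases List.mem_cons.1 h2 with heq | h3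
        · omega
        · have := (List.pairwise_cons.1 hpw2).1 _ h3
          omega
    by_cases hne : presN hours = []
    · -- no occupied hour at all: run from 0 has length 24, x must be 0
      have hallfree : ∀ j, j < 24 → occB hours j = false := by
        intro j hj
        unfold occB
        by_contra hcon
        have hmem0 : j % 24 ∈ presN hours := by
          apply (mem_presN hours (j % 24)).2
          refine ⟨by omega, ?_⟩
          simp only [Bool.not_eq_false] at hcon
          simpa [Nat.mod_eq_of_lt hj] using hcon
        rw [hne] at hmem0
        simp at hmem0
      have hf24 : ∀ u : Nat, fN hours u = 24 := by
        intro u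
        rw [fN_mod]
        apply freeCap_all
        intro j hj
        unfold occB
        rw [show (u % 24 + j) % 24 = (u % 24 + j) % 24 from rfl]
        have := hallfree ((u % 24 + j) % 24) (by omega)
        unfold occB at this
        rwa [Nat.mod_mod_of_dvd _ (by norm_num)] at this
      have hl1nil : l1 = [] := by
        cases hl1 : l1 with
        | nil => rfl
        | cons y t =>
            exfalso
            have hymem : y ∈ PySem.List.pyRange 0 24 1 := by rw [hdec, hl1]; simp
            rw [PySem.List.mem_pyRange_one] at hymem
            have hycast : y = ((y.toNat : Nat) : Int) := by omega
            have := hbefore y (by rw [hl1]; simp)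
            rw [hycast, runA_fN, hvx, hf24, hf24] at this
            omega
      have hx_eq : x = 0 := by
        rw [hl1nil] at hdec
        simp only [List.nil_append] at hdec
        have : PySem.List.pyRange 0 24 1 = 0 :: PySem.List.pyRange 1 24 1 :=
          PySem.List.pyRange_one_cons (by norm_num)
        rw [this] at hdec
        exact (List.cons.injEq .. ▸ hdec).1.symm
      have hie : (((presN hours).map (fun k : Nat => (k : Int))).isEmpty) = true := by
        simp [hne]
      simp only [hie, if_true]
      rw [hvx, hf24, hx_eq]
      decide
    · -- some hour is occupied: relate both sides through the circular gap at x
      have hie : (((presN hours).map (fun k : Nat => (k : Int))).isEmpty) = false := by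
        simp [List.isEmpty_iff, hne]
      simp only [hie, Bool.false_eq_true, if_false]
      rw [hvx]
      obtain ⟨ht24, htc⟩ := (mem_presN hours ((presN hours).head hne)).1 (List.head_mem hne)
      have htocc : occB hours ((presN hours).head hne) = true := by
        unfold occB
        rwa [Nat.mod_eq_of_lt ht24]
      obtain ⟨c, nx, hp, hcs⟩ := argmax_is_gap hours x.toNat hxN24 hmax hMpos _ ht24 htocc
      have hginlist := gaps_mem hours c nx hp
      rw [hcs] at hginlist
      have hlens_le : ∀ y ∈ (((((presN hours).map (fun k : Nat => (k : Int))).zip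
        ((((presN hours).map (fun k : Nat => (k : Int))).drop 1) ++
         (((presN hours).map (fun k : Nat => (k : Int))).take 1))).map
          (fun p => (PySem.Int.mod (p.1 + 1) 24, PySem.Int.mod (p.2 - p.1 - 1) 24)))).map (fun g => g.2), y ≤ ((fN hours x.toNat : Nat) : Int) := by
        intro y hy
        obtain ⟨g, hg, hgy⟩ := List.mem_map.1 hy
        obtain ⟨c', nx', hp', hgeq⟩ := mem_gaps hours g hg
        rw [← hgy, hgeq]
        have := hmax ((c' + 1) % 24) (by omega)
        simp only
        exact_mod_cast this
      have hMlens : ((fN hours x.toNat : Nat) : Int) ∈ (((((presN hours).map (fun k : Nat => (k : Int))).zip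
        ((((presN hours).map (fun k : Nat => (k : Int))).drop 1) ++
         (((presN hours).map (fun k : Nat => (k : Int))).take 1))).map
          (fun p => (PySem.Int.mod (p.1 + 1) 24, PySem.Int.mod (p.2 - p.1 - 1) 24)))).map (fun g => g.2) := by
        apply List.mem_map.2
        exact ⟨_, hginlist, rfl⟩
      cases hm : PySem.List.max? ((((((presN hours).map (fun k : Nat => (k : Int))).zip
        ((((presN hours).map (fun k : Nat => (k : Int))).drop 1) ++
         (((presN hours).map (fun k : Nat => (k : Int))).take 1))).map
          (fun p => (PySem.Int.mod (p.1 + 1) 24, PySem.Int.mod (p.2 - p.1 - 1) 24)))).map (fun g => g.2)) (fun x => x) with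
      | none =>
          exfalso
          rw [PySem.List.max?_eq_none_iff] at hm
          rw [hm] at hMlens
          simp at hMlens
      | some bestLen =>
          simp only [hm]
          have hbl : bestLen = ((fN hours x.toNat : Nat) : Int) := by
            have h1 := hlens_le _ (PySem.List.max?_mem hm)
            have h2 := PySem.List.max?_isMax hm _ hMlens
            omega
          rw [hbl]
          by_cases hM3 : ((fN hours x.toNat : Nat) : Int) < 3
          · rw [if_pos hM3, if_pos hM3]
          · rw [if_neg hM3, if_neg hM3]
            have hstarts_ge : ∀ y ∈ ((((((presN hours).map (fun k : Nat => (k : Int))).zip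
        ((((presN hours).map (fun k : Nat => (k : Int))).drop 1) ++
         (((presN hours).map (fun k : Nat => (k : Int))).take 1))).map
          (fun p => (PySem.Int.mod (p.1 + 1) 24, PySem.Int.mod (p.2 - p.1 - 1) 24)))).filter
                (fun g => g.2 == ((fN hours x.toNat : Nat) : Int))).map (fun g => g.1),
                ((x.toNat : Nat) : Int) ≤ y := by
              intro y hy
              obtain ⟨g, hg, hgy⟩ := List.mem_map.1 hy
              obtain ⟨hgmem, hgsnd⟩ := List.mem_filter.1 hg
              obtain ⟨c', nx', hp', hgeq⟩ := mem_gaps hours g hgmem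
              have hfg : fN hours ((c' + 1) % 24) = fN hours x.toNat := by
                rw [hgeq] at hgsnd
                simp only [beq_iff_eq] at hgsnd
                exact_mod_cast hgsnd
              have hgn24 : (c' + 1) % 24 < 24 := by omega
              have : ¬ ((c' + 1) % 24 < x.toNat) := by
                intro hlt
                have := hbefore' _ hlt
                omega
              rw [← hgy, hgeq]
              simp only
              exact_mod_cast by omega
            have hxstarts : ((x.toNat : Nat) : Int) ∈ ((((((presN hours).map (fun k : Nat => (k : Int))).zip
        ((((presN hours).map (fun k : Nat => (k : Int))).drop 1) ++
         (((presN hours).map (fun k : Nat => (k : Int))).take 1))).map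
          (fun p => (PySem.Int.mod (p.1 + 1) 24, PySem.Int.mod (p.2 - p.1 - 1) 24)))).filter
                (fun g => g.2 == ((fN hours x.toNat : Nat) : Int))).map (fun g => g.1) := by
              apply List.mem_map.2
              refine ⟨_, List.mem_filter.2 ⟨hginlist, by simp⟩, rfl⟩
            cases hmn : PySem.List.min? (((((((presN hours).map (fun k : Nat => (k : Int))).zip
        ((((presN hours).map (fun k : Nat => (k : Int))).drop 1) ++
         (((presN hours).map (fun k : Nat => (k : Int))).take 1))).map
          (fun p => (PySem.Int.mod (p.1 + 1) 24, PySem.Int.mod (p.2 - p.1 - 1) 24)))).filter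
                (fun g => g.2 == ((fN hours x.toNat : Nat) : Int))).map (fun g => g.1))
                (fun x => x) with
            | none =>
                exfalso
                rw [PySem.List.min?_eq_none_iff] at hmn
                rw [hmn] at hxstarts
                simp at hxstarts
            | some bestStart =>
                simp only [hmn]
                have hbs : bestStart = ((x.toNat : Nat) : Int) := by
                  have h1 := hstarts_ge _ (PySem.List.min?_mem hmn)
                  have h2 := PySem.List.min?_isMin hmn _ hxstarts
                  omega
                rw [hbs]
                simp
                omega
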